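-- pv_equiv track=rewrite | github.com/SequoiaDB/SequoiaDB | site_scons/Cheetah/ImportManager.py | nameSplit
-- ===== SOURCE A (Python) =====
-- def nameSplit(s):
--     rslt = []
--     i = j = 0
--     for j in range(len(s)):
--         if s[j] == '.':
--             rslt.append(s[i:j])
--             i = j + 1
--     if i < len(s):
--         rslt.append(s[i:])
--     return rslt
-- ===== SOURCE B (Python) =====
-- def nameSplit(s):
--     cuts = [-1] + [k for k, c in enumerate(s) if c == '.'] + [len(s)]
--     if s == '' or s[-1] == '.':
--         cuts.pop()
--     return [s[a + 1:b] for a, b in zip(cuts, cuts[1:])]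
-- ===== Notes on version B (the rewrite author's own statement) =====
-- stated objective: alternative
-- what changed: Replaces A's sequential accumulator loop (segment start index carried through the scan) by a staged index-based computation: first collect the list of dot positions, form the cut list [-1]+dots+[len(s)] (trimming the last cut when the string is empty or ends in a dot), then emit the slices between consecutive cuts with zip.
import Mathlib
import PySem

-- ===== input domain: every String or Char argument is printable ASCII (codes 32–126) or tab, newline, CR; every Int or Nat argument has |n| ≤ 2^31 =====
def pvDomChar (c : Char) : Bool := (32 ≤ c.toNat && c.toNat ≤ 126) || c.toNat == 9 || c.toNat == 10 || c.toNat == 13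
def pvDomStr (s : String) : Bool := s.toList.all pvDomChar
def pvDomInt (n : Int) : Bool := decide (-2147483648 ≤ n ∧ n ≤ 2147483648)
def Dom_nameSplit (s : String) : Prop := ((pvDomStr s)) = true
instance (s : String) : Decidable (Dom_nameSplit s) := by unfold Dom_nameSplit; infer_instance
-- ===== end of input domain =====

-- B replaces A's sequential accumulator scan by a staged computation: collect the dot
-- positions, build the cut list [-1]+dots+[len(s)] (trimmed when the string is empty or
-- ends in a dot), and emit the slices between consecutive cuts (objective: alternative).

-- ===== PORT A =====
-- A's loop body: 'if s[j] == '.': rslt.append(s[i:j]); i = j + 1', state (rslt, i)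
def nameSplitStep (s : String) (acc : List String × Int) (j : Int) : List String × Int :=
  if PySem.Str.pyGet? s j == some '.' then
    (acc.1 ++ [PySem.Str.slice s (some acc.2) (some j)], j + 1)
  else acc

def nameSplit (s : String) : List String :=
  let n := PySem.Str.len s
  let st := (PySem.List.pyRange 0 n 1).foldl (nameSplitStep s) ([], 0)
  if st.2 < n then st.1 ++ [PySem.Str.slice s (some st.2) none] else st.1

-- ===== PORT B =====
def nameSplit_alt (s : String) : List String :=
  -- cuts = [-1] + [k for k, c in enumerate(s) if c == '.'] + [len(s)]
  let cuts : List Int :=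
    [(-1 : Int)] ++ ((PySem.List.enumerate s.toList 0).filterMap
      (fun p => if p.2 = '.' then some p.1 else none)) ++ [PySem.Str.len s]
  -- if s == '' or s[-1] == '.': cuts.pop()
  let cuts := if s == "" || (PySem.Str.pyGet? s (-1) == some '.') then cuts.dropLast else cuts
  -- [s[a + 1:b] for a, b in zip(cuts, cuts[1:])]
  (cuts.zip (PySem.List.slice cuts (some 1) none)).map
    (fun p => PySem.Str.slice s (some (p.1 + 1)) (some p.2))

-- ===== PRECONDITION & SPEC =====
def Spec_nameSplit (s : String) (out : List String) : Prop := out = nameSplit_alt s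
instance (s : String) (out : List String) : Decidable (Spec_nameSplit s out) := by unfold Spec_nameSplit; infer_instance

-- ===== CLAIM (what is proved, stated in full; the proofs are below) =====
def Claim_equal_nameSplit : Prop := ∀ (s : String), Dom_nameSplit s → Spec_nameSplit s (nameSplit s)

-- ===== LEMMAS AND PROOFS =====

-- left-to-right segment accumulator: (complete segments, current segment)
def segStep (st : List (List Char) × List Char) (c : Char) : List (List Char) × List Char :=
  if c = '.' then (st.1 ++ [st.2], []) else (st.1, st.2 ++ [c])

-- positions of '.' in l, as B's comprehension computes them
def dotsL (l : List Char) : List Int :=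
  (PySem.List.enumerate l 0).filterMap (fun p => if p.2 = '.' then some p.1 else none)

-- consecutive pairs of a list (what zip(cuts, cuts[1:]) yields)
def pairsC : List Int → List (Int × Int)
  | a :: b :: r => (a, b) :: pairsC (b :: r)
  | _ => []

-- the slice between two cuts
def segSl (l : List Char) (p : Int × Int) : List Char :=
  PySem.List.slice l (some (p.1 + 1)) (some p.2)

lemma zip_tail_eq_pairsC (xs : List Int) : xs.zip xs.tail = pairsC xs := by
  induction xs with
  | nil => rfl
  | cons a r ih =>
    cases r with
    | nil => rfl
    | cons b r' => simp [pairsC, List.zip_cons_cons, ← ih]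

lemma pairsC_snoc (xs : List Int) (y : Int) :
    pairsC (xs ++ [y]) = pairsC xs ++ (xs.getLast?.map (fun x => (x, y))).toList := by
  induction xs with
  | nil => rfl
  | cons x r ih =>
    cases r with
    | nil => rfl
    | cons b r' =>
      simp only [List.cons_append, pairsC, List.getLast?_cons_cons]
      rw [← List.cons_append, ih]

lemma pairsC_mem_snd {p : Int × Int} {x : Int} {ys : List Int}
    (h : p ∈ pairsC (x :: ys)) : p.2 ∈ ys := by
  induction ys generalizing x with
  | nil => simp [pairsC] at h
  | cons b r ih =>
    simp only [pairsC, List.mem_cons] at h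
    rcases h with h | h
    · simp [h]
    · exact List.mem_cons_of_mem _ (ih h)

lemma pairsC_mem_fst {p : Int × Int} {xs : List Int}
    (h : p ∈ pairsC xs) : p.1 ∈ xs := by
  induction xs with
  | nil => simp [pairsC] at h
  | cons x r ih =>
    cases r with
    | nil => simp [pairsC] at h
    | cons b r' =>
      simp only [pairsC, List.mem_cons] at h
      rcases h with h | h
      · simp [h]
      · exact List.mem_cons_of_mem _ (ih h)

lemma dotsL_append (l : List Char) (c : Char) :
    dotsL (l ++ [c]) = dotsL l ++ (if c = '.' then [(l.length : Int)] else []) := by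
  unfold dotsL
  rw [PySem.List.enumerate_append, List.filterMap_append]
  congr 1
  simp [PySem.List.enumerate]
  split_ifs <;> simp_all

lemma dotsL_bound {l : List Char} {x : Int} (h : x ∈ dotsL l) :
    0 ≤ x ∧ x < (l.length : Int) := by
  unfold dotsL at h
  rw [List.mem_filterMap] at h
  obtain ⟨p, hp, hx⟩ := h
  rw [PySem.List.mem_enumerate_iff] at hp
  obtain ⟨k, hk, rfl⟩ := hp
  simp only at hx
  split_ifs at hx with hdot
  simp only [Option.some.injEq] at hx
  subst hx
  constructor <;> omega

-- drop/take through an append, below the split point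
lemma drop_append_le {α : Type} (l₁ l₂ : List α) {n : Nat} (h : n ≤ l₁.length) :
    (l₁ ++ l₂).drop n = l₁.drop n ++ l₂ := by
  induction l₁ generalizing n with
  | nil =>
    have h0 : n = 0 := by simpa using h
    subst h0; simp
  | cons a t ih =>
    cases n with
    | zero => simp
    | succ m =>
      simp only [List.cons_append, List.drop_succ_cons]
      exact ih (by simpa using h)

lemma take_append_le {α : Type} (l₁ l₂ : List α) {n : Nat} (h : n ≤ l₁.length) :
    (l₁ ++ l₂).take n = l₁.take n := by
  induction l₁ generalizing n with
  | nil =>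
    have h0 : n = 0 := by simpa using h
    subst h0; simp
  | cons a t ih =>
    cases n with
    | zero => simp
    | succ m =>
      simp only [List.cons_append, List.take_succ_cons]
      rw [ih (by simpa using h)]

-- slicing within the old bounds ignores an appended character
lemma slice_snoc (l : List Char) (c : Char) {a b : Int}
    (ha : 0 ≤ a) (hb : 0 ≤ b) (hbn : b ≤ (l.length : Int)) :
    PySem.List.slice (l ++ [c]) (some a) (some b) = PySem.List.slice l (some a) (some b) := by
  rw [PySem.List.slice_toNat _ ha hb, PySem.List.slice_toNat _ ha hb]
  have hb' : b.toNat ≤ l.length := by omega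
  by_cases hal : a.toNat ≤ l.length
  · rw [drop_append_le l [c] hal, take_append_le _ [c] (by simp [List.length_drop]; omega)]
  · have hx : List.drop a.toNat (l ++ [c]) = [] :=
      List.drop_eq_nil_of_le (by simp; omega)
    have hy : List.drop a.toNat l = [] := List.drop_eq_nil_of_le (by omega)
    rw [hx, hy]

-- the final slice absorbs an appended non-dot character
lemma slice_snoc_last (l : List Char) (c : Char) {a : Int}
    (ha : 0 ≤ a) (han : a ≤ (l.length : Int)) :
    PySem.List.slice (l ++ [c]) (some a) (some ((l.length : Int) + 1)) =
      PySem.List.slice l (some a) (some (l.length : Int)) ++ [c] := by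
  have h1 : (0 : Int) ≤ (l.length : Int) + 1 := by omega
  have h2 : (0 : Int) ≤ (l.length : Int) := by omega
  rw [PySem.List.slice_toNat _ ha h1, PySem.List.slice_toNat _ ha h2]
  have ha' : a.toNat ≤ l.length := by omega
  have hd : ((l.length : Int) + 1).toNat = l.length + 1 := by omega
  have he : ((l.length : Int)).toNat = l.length := by omega
  rw [hd, he, drop_append_le l [c] ha']
  rw [List.take_of_length_le (by simp; omega), List.take_of_length_le (by simp)]

-- the trailing segment after processing l ++ [c]
lemma seg2_snoc (l : List Char) (c : Char) :
    ((l ++ [c]).foldl segStep ([], [])).2 =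
      if c = '.' then [] else (l.foldl segStep ([], [])).2 ++ [c] := by
  rw [List.foldl_append]
  simp only [List.foldl_cons, List.foldl_nil, segStep]
  split_ifs <;> rfl

lemma seg2_empty_iff (l : List Char) :
    (l.foldl segStep ([], [])).2 = [] ↔ (l = [] ∨ l.getLast? = some '.') := by
  induction l using List.reverseRecOn with
  | nil => simp
  | append_singleton l c _ =>
    rw [seg2_snoc]
    by_cases hc : c = '.' <;> simp [hc]

-- splitting the cut-slice correspondence into its init and its last element
lemma split_of_cuts (l : List Char)
    (h : (pairsC ((-1 : Int) :: (dotsL l ++ [(l.length : Int)]))).map (segSl l)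
      = (l.foldl segStep ([], [])).1 ++ [(l.foldl segStep ([], [])).2]) :
    ∃ a₀, ((-1 : Int) :: dotsL l).getLast? = some a₀ ∧
      (pairsC ((-1 : Int) :: dotsL l)).map (segSl l) = (l.foldl segStep ([], [])).1 ∧
      segSl l (a₀, (l.length : Int)) = (l.foldl segStep ([], [])).2 ∧
      0 ≤ a₀ + 1 ∧ a₀ + 1 ≤ (l.length : Int) := by
  have hxs : ((-1 : Int) :: dotsL l).getLast? ≠ none := by
    cases hh : ((-1 : Int) :: dotsL l).getLast? with
    | some a => simp
    | none => simp at hh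
  obtain ⟨a₀, ha₀⟩ := Option.ne_none_iff_exists'.mp hxs
  have ha₀mem : a₀ ∈ (-1 : Int) :: dotsL l := List.mem_of_getLast? ha₀
  have ha₀b : 0 ≤ a₀ + 1 ∧ a₀ + 1 ≤ (l.length : Int) := by
    rcases List.mem_cons.mp ha₀mem with hm | hm
    · subst hm; constructor <;> simp
    · have := dotsL_bound hm; omega
  have hsplit : (-1 : Int) :: (dotsL l ++ [(l.length : Int)]) =
      ((-1 : Int) :: dotsL l) ++ [(l.length : Int)] := by simp
  rw [hsplit, pairsC_snoc, ha₀] at h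
  simp only [Option.map_some, Option.toList_some, List.map_append, List.map_cons,
    List.map_nil] at h
  obtain ⟨h1, h2⟩ := List.append_inj' h (by simp)
  exact ⟨a₀, ha₀, h1, by simpa using h2, ha₀b.1, ha₀b.2⟩

-- the central correspondence: the slices between consecutive cuts are exactly the
-- segments (including the trailing one) that the left-to-right accumulator produces
lemma cuts_slices (l : List Char) :
    (pairsC ((-1 : Int) :: (dotsL l ++ [(l.length : Int)]))).map (segSl l)
      = (l.foldl segStep ([], [])).1 ++ [(l.foldl segStep ([], [])).2] := by
  induction l using List.reverseRecOn with
  | nil => decide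
  | append_singleton l c ih =>
    have hlen1 : (((l ++ [c]).length : Nat) : Int) = (l.length : Int) + 1 := by
      rw [List.length_append]; push_cast [List.length_cons, List.length_nil]; ring
    rw [dotsL_append, List.foldl_append, hlen1]
    simp only [List.foldl_cons, List.foldl_nil, segStep]
    by_cases hc : c = '.'
    · -- a dot closes the current segment; the new last pair slices to []
      rw [if_pos hc, if_pos hc]
      rw [show (-1 : Int) :: (dotsL l ++ [(l.length : Int)] ++ [(l.length : Int) + 1])
            = (((-1 : Int) :: (dotsL l ++ [(l.length : Int)])) ++ [(l.length : Int) + 1]) by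
        simp]
      rw [pairsC_snoc]
      have hlast : ((-1 : Int) :: (dotsL l ++ [(l.length : Int)])).getLast? =
          some (l.length : Int) := by
        rw [show (-1 : Int) :: (dotsL l ++ [(l.length : Int)]) =
              ((-1 : Int) :: dotsL l) ++ [(l.length : Int)] by simp,
            List.getLast?_concat]
      rw [hlast]
      simp only [Option.map_some, Option.toList_some, List.map_append, List.map_cons,
        List.map_nil]
      have hmap2 : (pairsC ((-1 : Int) :: (dotsL l ++ [(l.length : Int)]))).map (segSl (l ++ [c]))
          = (pairsC ((-1 : Int) :: (dotsL l ++ [(l.length : Int)]))).map (segSl l) := by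
        apply List.map_congr_left
        intro p hp
        have hsnd := pairsC_mem_snd hp
        have hfst := pairsC_mem_fst hp
        have hb2 : 0 ≤ p.2 ∧ p.2 ≤ (l.length : Int) := by
          rcases List.mem_append.mp hsnd with hm | hm
          · have := dotsL_bound hm; omega
          · simp at hm; omega
        have hfa : 0 ≤ p.1 + 1 := by
          rcases List.mem_cons.mp hfst with hm | hm
          · omega
          · rcases List.mem_append.mp hm with hm | hm
            · have := dotsL_bound hm; omega
            · simp at hm; omega
        unfold segSl
        exact slice_snoc l c hfa hb2.1 hb2.2
      have hnilslice : segSl (l ++ [c]) ((l.length : Int), (l.length : Int) + 1) = [] := by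
        unfold segSl
        rw [PySem.List.slice_toNat _ (by positivity) (by positivity)]
        simp
      rw [hmap2, ih, hnilslice]
    · -- an ordinary character extends the trailing segment
      obtain ⟨a₀, ha₀, ih1, ih2, hb1, hb2⟩ := split_of_cuts l ih
      rw [if_neg hc, if_neg hc, List.append_nil]
      rw [show (-1 : Int) :: (dotsL l ++ [(l.length : Int) + 1])
            = (((-1 : Int) :: dotsL l) ++ [(l.length : Int) + 1]) by simp]
      rw [pairsC_snoc, ha₀]
      simp only [Option.map_some, Option.toList_some, List.map_append, List.map_cons,
        List.map_nil]
      have hmap : (pairsC ((-1 : Int) :: dotsL l)).map (segSl (l ++ [c]))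
          = (pairsC ((-1 : Int) :: dotsL l)).map (segSl l) := by
        apply List.map_congr_left
        intro p hp
        have hsnd := pairsC_mem_snd hp
        have hfst := pairsC_mem_fst hp
        have hb := dotsL_bound hsnd
        have hfa : 0 ≤ p.1 + 1 := by
          rcases List.mem_cons.mp hfst with hm | hm
          · omega
          · have := dotsL_bound hm; omega
        unfold segSl
        exact slice_snoc l c hfa hb.1 (le_of_lt hb.2)
      have hlastsl : segSl (l ++ [c]) (a₀, (l.length : Int) + 1)
          = (l.foldl segStep ([], [])).2 ++ [c] := by
        unfold segSl
        rw [slice_snoc_last l c hb1 hb2]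
        unfold segSl at ih2
        rw [ih2]
      rw [hmap, ih1, hlastsl]

-- A's index loop tracked against the segment accumulator
lemma invA (s : String) (j : Nat) (hj : j ≤ s.toList.length) :
    (PySem.List.pyRange 0 (j : Int) 1).foldl (nameSplitStep s) ([], 0) =
      (((s.toList.take j).foldl segStep ([], [])).1.map String.ofList,
        (j : Int) - ((s.toList.take j).foldl segStep ([], [])).2.length) ∧
    ((s.toList.take j).foldl segStep ([], [])).2.length ≤ j ∧
    ((s.toList.take j).foldl segStep ([], [])).2 =
      (s.toList.drop (j - ((s.toList.take j).foldl segStep ([], [])).2.length)).take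
        (((s.toList.take j).foldl segStep ([], [])).2.length) := by
  induction j with
  | zero => simp
  | succ j ih =>
    have hj' : j ≤ s.toList.length := Nat.le_of_succ_le hj
    have hjlt : j < s.toList.length := hj
    obtain ⟨A1, A2, A3⟩ := ih hj'
    have htake : s.toList.take (j+1) = s.toList.take j ++ [s.toList[j]] := by
      rw [List.take_add_one]; simp [List.getElem?_eq_getElem hjlt]
    have hget : PySem.Str.pyGet? s ((j : Nat) : Int) = some s.toList[j] := by
      rw [PySem.Str.pyGet?_natCast]; simp [List.getElem?_eq_getElem hjlt]
    have hrange : PySem.List.pyRange 0 (((j+1 : Nat)) : Int) 1 =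
        PySem.List.pyRange 0 (j : Int) 1 ++ [(j : Int)] := by
      push_cast
      exact PySem.List.pyRange_one_succ_right (Int.natCast_nonneg j)
    rw [hrange, List.foldl_append, htake, List.foldl_append, A1]
    simp only [List.foldl_cons, List.foldl_nil]
    set st := (s.toList.take j).foldl segStep ([], []) with hst
    by_cases hc : s.toList[j] = '.'
    · -- the character at j is a dot: close the current segment
      have hseg : segStep st s.toList[j] = (st.1 ++ [st.2], []) := by simp [segStep, hc]
      have hslice : PySem.Str.slice s (some ((j : Int) - st.2.length)) (some (j : Int)) =
          String.ofList st.2 := by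
        have ha : ((j : Int) - st.2.length) = ((j - st.2.length : Nat) : Int) := by
          push_cast [Nat.cast_sub A2]; ring
        rw [← String.toList_inj, PySem.Str.toList_slice, ha,
            PySem.Chars.slice_eq_listSlice, PySem.List.slice_natCast]
        have h2 : j - (j - st.2.length) = st.2.length := by omega
        rw [h2]
        simpa using A3.symm
      rw [hseg]
      have hcond : (PySem.Str.pyGet? s ((j : Nat) : Int) == some '.') = true := by
        rw [hget]; simp [hc]
      refine ⟨?_, by simp, by simp⟩
      simp only [nameSplitStep, hcond, if_true, hslice]
      refine Prod.ext (by simp) (by simp)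
    · -- ordinary character: extend the current segment
      have hseg : segStep st s.toList[j] = (st.1, st.2 ++ [s.toList[j]]) := by
        simp [segStep, hc]
      have hcond : (PySem.Str.pyGet? s ((j : Nat) : Int) == some '.') = false := by
        rw [hget]; simp [hc]
      rw [hseg]
      refine ⟨?_, ?_, ?_⟩
      · simp only [nameSplitStep, hcond, Bool.false_eq_true, if_false]
        refine Prod.ext rfl ?_
        simp only [List.length_append, List.length_cons, List.length_nil]
        push_cast
        ring
      · simp only [List.length_append, List.length_cons, List.length_nil]
        omega
      · simp only [List.length_append, List.length_cons, List.length_nil]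
        have hidx : j + 1 - (st.2.length + (0 + 1)) = j - st.2.length := by omega
        have hdropget : (s.toList.drop (j - st.2.length))[st.2.length]? = some s.toList[j] := by
          rw [List.getElem?_drop]
          have h3 : j - st.2.length + st.2.length = j := by omega
          rw [h3]; simp [List.getElem?_eq_getElem hjlt]
        rw [hidx, List.take_add_one, hdropget]
        simp [A3.symm]

-- A's value expressed through the segment accumulator
lemma A_val (s : String) :
    nameSplit s = (((s.toList.foldl segStep ([], [])).1).map String.ofList)
      ++ (if (s.toList.foldl segStep ([], [])).2 = [] then []
          else [String.ofList (s.toList.foldl segStep ([], [])).2]) := by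
  unfold nameSplit
  obtain ⟨A1, A2, A3⟩ := invA s s.toList.length le_rfl
  rw [List.take_length] at A1 A2 A3
  have hL : s.toList.length = s.length := by simp
  rw [hL] at A1 A2 A3
  set st := s.toList.foldl segStep ([], []) with hst
  have hlen : PySem.Str.len s = (s.length : Int) := by simp [pysem]
  simp only [hlen, A1]
  by_cases hcur : st.2 = []
  · have hc1 : ¬ ((s.length : Int) - (st.2.length : Int) < (s.length : Int)) := by
      simp [hcur]
    rw [if_neg hc1, if_pos hcur, List.append_nil]
  · have hlenpos : 0 < st.2.length := List.length_pos_iff.mpr hcur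
    have hc1 : ((s.length : Int) - (st.2.length : Int) < (s.length : Int)) := by
      omega
    rw [if_pos hc1, if_neg hcur]
    have hslice : PySem.Str.slice s (some ((s.length : Int) - st.2.length)) none =
        String.ofList st.2 := by
      have ha : ((s.length : Int) - st.2.length) =
          ((s.length - st.2.length : Nat) : Int) := by
        push_cast [Nat.cast_sub A2]; ring
      rw [← String.toList_inj, PySem.Str.toList_slice, ha,
          PySem.Chars.slice_eq_listSlice, PySem.List.slice_from _ (by positivity)]
      have h1 : (s.toList.drop (s.length - st.2.length)).length ≤ st.2.length := by
        simp; omega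
      rw [Int.toNat_natCast]
      rw [List.take_of_length_le h1] at A3
      simp [← A3]
    rw [hslice]

lemma strSlice_ofList (s : String) (a? b? : Option Int) :
    PySem.Str.slice s a? b? = String.ofList (PySem.List.slice s.toList a? b?) := by
  rw [← PySem.Chars.slice_eq_listSlice, ← PySem.Str.toList_slice, String.ofList_toList]

lemma pyGet_neg_one (l : List Char) : PySem.List.pyGet? l (-1) = l.getLast? := by
  cases l with
  | nil => rfl
  | cons x r =>
    simp only [PySem.List.pyGet?, PySem.List.pyIdx?]
    norm_num
    rw [List.getLast?_eq_getElem?]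
    simp

lemma cond_iff (s : String) :
    ((s == "") || (PySem.Str.pyGet? s (-1) == some '.')) = true ↔
      (s.toList = [] ∨ s.toList.getLast? = some '.') := by
  have hg : PySem.Str.pyGet? s (-1) = s.toList.getLast? := by
    rw [show PySem.Str.pyGet? s (-1) = PySem.Chars.pyGet? s.toList (-1) from rfl,
        PySem.Chars.pyGet?_eq_listPyGet?, pyGet_neg_one]
  rw [hg, Bool.or_eq_true, beq_iff_eq, beq_iff_eq]
  constructor
  · rintro (h | h)
    · left; simp [h]
    · right; exact h
  · rintro (h | h)
    · left; rw [← String.ofList_toList (s := s), h]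
    · right; exact h

theorem nameSplit_spec : Claim_equal_nameSplit := by
  intro s _
  unfold Spec_nameSplit
  simp only [nameSplit_alt]
  rw [A_val s]
  set l := s.toList with hl
  set st := l.foldl segStep ([], []) with hst
  rw [show PySem.Str.len s = ((l.length : Nat) : Int) from by rw [hl]; exact PySem.Str.len_eq s]
  rw [show (PySem.List.enumerate l 0).filterMap
        (fun p => if p.2 = '.' then some p.1 else none) = dotsL l from rfl]
  by_cases hcond : (l = [] ∨ l.getLast? = some '.')
  · -- trailing segment empty: the last cut is popped, A skips the final append
    have hc : ((s == "") || (PySem.Str.pyGet? s (-1) == some '.')) = true :=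
      (cond_iff s).mpr hcond
    have hempty : st.2 = [] := (seg2_empty_iff l).mpr hcond
    rw [if_pos hc, if_pos hempty, List.append_nil]
    have hdrop : (([(-1 : Int)] ++ dotsL l ++ [(l.length : Int)]).dropLast)
        = (-1 : Int) :: dotsL l := by
      rw [show ([(-1 : Int)] ++ dotsL l ++ [(l.length : Int)])
            = (((-1 : Int) :: dotsL l) ++ [(l.length : Int)]) by simp,
          List.dropLast_concat]
    rw [hdrop, PySem.List.slice_from_one, zip_tail_eq_pairsC]
    obtain ⟨a₀, _, h1, _, _, _⟩ := split_of_cuts l (cuts_slices l)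
    rw [← h1, List.map_map]
    apply List.map_congr_left
    intro p _
    simp only [Function.comp_apply]
    rw [strSlice_ofList]
    rfl
  · -- trailing segment nonempty: all cuts kept, A appends the tail slice
    have hcf : ¬ (((s == "") || (PySem.Str.pyGet? s (-1) == some '.')) = true) :=
      fun h => hcond ((cond_iff s).mp h)
    have hne : st.2 ≠ [] := fun h => hcond ((seg2_empty_iff l).mp h)
    rw [if_neg hcf, if_neg hne]
    rw [PySem.List.slice_from_one, zip_tail_eq_pairsC]
    have hform : (pairsC ([(-1 : Int)] ++ dotsL l ++ [(l.length : Int)])).map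
        (fun p => PySem.Str.slice s (some (p.1 + 1)) (some p.2))
        = ((pairsC ((-1 : Int) :: (dotsL l ++ [(l.length : Int)]))).map (segSl l)).map
          String.ofList := by
      rw [show ([(-1 : Int)] ++ dotsL l ++ [(l.length : Int)])
            = ((-1 : Int) :: (dotsL l ++ [(l.length : Int)])) by simp,
          List.map_map]
      apply List.map_congr_left
      intro p _
      simp only [Function.comp_apply]
      rw [strSlice_ofList]
      rfl
    rw [hform, cuts_slices l, ← hst]
    simp
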